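-- pv_equiv track=rewrite | github.com/lesc-ufv/fdam | fdam-hw-generator/src/make_select.py | make_select_tree_array
-- ===== SOURCE A (Python) =====
-- def make_select_tree_array(radix, num_input, array):
--     if radix < 2:
--         raise Exception("The radix parameter needs greater than 1, found: %d" % radix)
--     m_array = []
--     while num_input > radix:
--         m_array.append(radix)
--         num_input = num_input - radix
--     else:
--         m_array.append(num_input)
--
--     array.append(m_array)
--     if len(m_array) == 1:
--         return array
--     else:
--         return make_select_tree_array(radix, len(m_array), array)
-- ===== SOURCE B (Python) =====
-- def make_select_tree_array(radix, num_input, array):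
--     if radix < 2:
--         raise Exception("The radix parameter needs greater than 1, found: %d" % radix)
--     ns = [num_input]
--     while ns[-1] > radix:
--         ns.append((ns[-1] - 1) // radix + 1)
--     for n, k in zip(ns, ns[1:] + [1]):
--         array.append([radix] * (k - 1) + [n - radix * (k - 1)])
--     return array
-- ===== Notes on version B (the rewrite author's own statement) =====
-- stated objective: alternative
-- what changed: Replaces A's per-level recursion with an embedded per-unit subtraction loop by two staged passes: first compute only the chain of level sizes with one divmod per level, then materialise all levels at once by zipping each count with its successor; same overall cost since the output size dominates.
import Mathlib
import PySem

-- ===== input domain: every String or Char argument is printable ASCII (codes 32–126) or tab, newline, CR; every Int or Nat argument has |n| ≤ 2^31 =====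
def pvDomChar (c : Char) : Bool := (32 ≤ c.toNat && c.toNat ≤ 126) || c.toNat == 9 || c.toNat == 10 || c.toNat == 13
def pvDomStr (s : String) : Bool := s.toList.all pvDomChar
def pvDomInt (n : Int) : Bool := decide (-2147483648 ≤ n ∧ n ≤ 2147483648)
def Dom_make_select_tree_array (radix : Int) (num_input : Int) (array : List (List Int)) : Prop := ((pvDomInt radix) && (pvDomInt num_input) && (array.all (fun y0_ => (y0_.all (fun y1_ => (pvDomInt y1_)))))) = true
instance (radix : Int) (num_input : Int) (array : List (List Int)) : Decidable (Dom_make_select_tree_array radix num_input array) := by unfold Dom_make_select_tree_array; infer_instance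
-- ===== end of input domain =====

-- B replaces A's recursion (one level appended per call, each built by a per-unit
-- subtraction loop) by two staged passes: first a loop computing only the level SIZE chain
-- via divmod, then a zip that materialises every level at once; A mutates `array` in place
-- and B performs the equivalent appends; the equivalence proved is about the return value.

-- ===== PORT A =====
-- A's inner `while num_input > radix` subtraction loop.  The `2 ≤ radix` conjunct in the
-- guard is only a totality guard (Python raises before this loop when radix < 2, which
-- Pre_ excludes); on Pre_ it is always true.
def levelA (radix n : Int) : List Int :=
  if _h : 2 ≤ radix ∧ radix < n then radix :: levelA radix (n - radix) else [n]
termination_by n.toNat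
decreasing_by omega

-- A's outer structure: append the level, return if it is a singleton, else recurse on its
-- length.  `fuel` is a totality guard only; `num_input.toNat + 2` always suffices since the
-- running count strictly decreases.
def treeA (fuel : Nat) (radix n : Int) (array : List (List Int)) : List (List Int) :=
  match fuel with
  | 0 => array
  | fuel + 1 =>
    let m := levelA radix n
    let array' := array ++ [m]
    if m.length = 1 then array' else treeA fuel radix (m.length : Int) array'

def make_select_tree_array (radix : Int) (num_input : Int) (array : List (List Int)) : List (List Int) :=
  if radix < 2 then array  -- Python raises here (outside Pre_)
  else treeA (num_input.toNat + 2) radix num_input array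

-- ===== PORT B =====
-- Source B's first pass: the chain of running counts, `ns`.  `fuel` is the totality guard for
-- the while loop; `num_input.toNat + 2` always suffices since the counts strictly decrease.
def countsB (fuel : Nat) (radix n : Int) : List Int :=
  match fuel with
  | 0 => [n]
  | fuel + 1 =>
    if radix < n then n :: countsB fuel radix (PySem.Int.floordiv (n - 1) radix + 1)
    else [n]

-- Source B's loop body: the level for count n whose successor count is k.
def mkLevel (radix n k : Int) : List Int :=
  List.replicate (k - 1).toNat radix ++ [n - radix * (k - 1)]

-- Source B's `zip(ns, ns[1:] + [1])` pass.
def buildLevels (radix : Int) (ns : List Int) : List (List Int) :=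
  List.zipWith (mkLevel radix) ns (ns.tail ++ [1])

def make_select_tree_array_alt (radix : Int) (num_input : Int) (array : List (List Int)) : List (List Int) :=
  if radix < 2 then array  -- Python raises here (outside Pre_)
  else array ++ buildLevels radix (countsB (num_input.toNat + 2) radix num_input)

-- ===== PRECONDITION & SPEC =====
-- Pre_ excludes exactly the inputs where Python A raises its explicit Exception (radix < 2).
def Pre_make_select_tree_array (radix : Int) (num_input : Int) (array : List (List Int)) : Prop := 2 ≤ radix
instance (radix : Int) (num_input : Int) (array : List (List Int)) : Decidable (Pre_make_select_tree_array radix num_input array) := by unfold Pre_make_select_tree_array; infer_instance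
def pvWitness_make_select_tree_array : Int × Int × List (List Int) := (2, 7, [[1, 2]])

def Spec_make_select_tree_array (radix : Int) (num_input : Int) (array : List (List Int)) (out : List (List Int)) : Prop := out = make_select_tree_array_alt radix num_input array
instance (radix : Int) (num_input : Int) (array : List (List Int)) (out : List (List Int)) : Decidable (Spec_make_select_tree_array radix num_input array out) := by unfold Spec_make_select_tree_array; infer_instance

-- ===== CLAIM (what is proved, stated in full; the proofs are below) =====
def Claim_equal_make_select_tree_array : Prop := ∀ (radix : Int) (num_input : Int) (array : List (List Int)), Dom_make_select_tree_array radix num_input array → Pre_make_select_tree_array radix num_input array → Spec_make_select_tree_array radix num_input array (make_select_tree_array radix num_input array)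

-- ===== LEMMAS AND PROOFS =====

-- A's subtraction loop in closed form: q copies of radix then the remainder, q = (n-1)/r.
theorem levelA_closed (r n : Int) (hr : 2 ≤ r) (hn : r < n) :
    levelA r n = List.replicate ((n - 1) / r).toNat r ++ [n - r * ((n - 1) / r)] := by
  rw [levelA, dif_pos ⟨hr, hn⟩]
  have hshift : (n - 1) / r = (n - r - 1) / r + 1 := by
    have h := Int.add_mul_ediv_right (n - r - 1) 1 (by omega : r ≠ 0)
    rw [one_mul] at h
    rw [show n - 1 = n - r - 1 + r by ring, h]
  by_cases h2 : n - r ≤ r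
  · have q0 : (n - r - 1) / r = 0 := Int.ediv_eq_zero_of_lt (by omega) (by omega)
    rw [levelA, dif_neg (by omega), hshift, q0]
    norm_num
  · have hq' : (0:Int) ≤ (n - r - 1) / r := Int.ediv_nonneg (by omega) (by omega)
    rw [levelA_closed r (n - r) hr (by omega), hshift,
      show ((n - r - 1) / r + 1).toNat = ((n - r - 1) / r).toNat + 1 by omega,
      List.replicate_succ,
      show n - r * ((n - r - 1) / r + 1) = n - r - r * ((n - r - 1) / r) from by ring]
    simp
termination_by n.toNat
decreasing_by omega

-- countsB always starts with its argument.
theorem countsB_head (fuel : Nat) (r n : Int) : ∃ t, countsB fuel r n = n :: t := by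
  cases fuel with
  | zero => exact ⟨[], rfl⟩
  | succ fuel =>
    by_cases h : r < n
    · exact ⟨_, by rw [countsB, if_pos h]⟩
    · exact ⟨[], by rw [countsB, if_neg h]⟩

theorem buildLevels_cons (r a b : Int) (t : List Int) :
    buildLevels r (a :: b :: t) = mkLevel r a b :: buildLevels r (b :: t) := by
  simp [buildLevels]

-- Main invariant: with enough fuel, A's recursion equals B's staged computation.
theorem treeA_eq_staged (r : Int) (hr : 2 ≤ r) :
    ∀ (fuel : Nat) (n : Int) (array : List (List Int)), n.toNat + 1 ≤ fuel →
      treeA fuel r n array = array ++ buildLevels r (countsB fuel r n) := by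
  intro fuel
  induction fuel with
  | zero => intro n array h; omega
  | succ fuel ih =>
    intro n array hfuel
    by_cases hn : r < n
    · -- the recursive case
      set q : Int := (n - 1) / r with hqdef
      have hdm' : r * q + (n - 1) % r = n - 1 := by
        rw [hqdef]; exact Int.mul_ediv_add_emod (n - 1) r
      have hm0 : 0 ≤ (n - 1) % r := Int.emod_nonneg _ (by omega)
      have hmr : (n - 1) % r < r := Int.emod_lt_of_pos _ (by omega)
      have hq1 : 1 ≤ q := by
        rw [hqdef]
        have h := Int.add_mul_ediv_right (n - r - 1) 1 (by omega : r ≠ 0)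
        rw [one_mul] at h
        rw [show n - 1 = n - r - 1 + r by ring, h]
        have : (0:Int) ≤ (n - r - 1) / r := Int.ediv_nonneg (by omega) (by omega)
        omega
      have h2q : 2 * q ≤ r * q := by
        have := mul_le_mul_of_nonneg_right hr (by omega : (0:Int) ≤ q)
        linarith
      have hqn : q + 1 < n := by omega
      have hlen : (levelA r n).length = q.toNat + 1 := by
        rw [levelA_closed r n hr hn, ← hqdef]
        simp
      have hlvl : levelA r n = mkLevel r n (q + 1) := by
        rw [levelA_closed r n hr hn, ← hqdef, mkLevel]
        norm_num
      have hfd : PySem.Int.floordiv (n - 1) r + 1 = q + 1 := by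
        rw [PySem.Int.floordiv_eq_ediv_of_pos (by omega), hqdef]
      rw [treeA]
      simp only [hlen]
      rw [if_neg (by omega), show ((q.toNat + 1 : Nat) : Int) = q + 1 by omega,
        ih (q + 1) (array ++ [levelA r n]) (by omega)]
      rw [countsB, if_pos hn, hfd]
      obtain ⟨t, ht⟩ := countsB_head fuel r (q + 1)
      rw [ht, buildLevels_cons, ← ht, hlvl]
      simp
    · -- the final single-element level
      have hlvl : levelA r n = [n] := by rw [levelA, dif_neg (by omega)]
      rw [treeA, countsB, if_neg hn]
      simp [hlvl, buildLevels, mkLevel]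

-- ===== VERDICT (by name: the statement is the Claim_ definition above) =====
theorem make_select_tree_array_spec : Claim_equal_make_select_tree_array := by
  intro radix num_input array _hdom hpre
  replace hpre : 2 ≤ radix := hpre
  unfold Spec_make_select_tree_array make_select_tree_array make_select_tree_array_alt
  rw [if_neg (by omega), if_neg (by omega),
    treeA_eq_staged radix hpre _ num_input array (by omega)]
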